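-- pv_equiv track=rewrite | github.com/Mashi007/pagos | backend/app/utils/validators.py | format_dni
-- ===== SOURCE A (Python) =====
-- def format_dni(dni: str) -> str:
--     # Ejemplo: 12345678 -> 1.234.567-8
--     # Args:
--     #     dni: DNI sin formato
--     # Returns:
--     #     str: DNI formateado
--     if not dni:
--         return dni
--
--     dni_clean = dni.replace(".", "").replace("-", "").strip()
--
--     if len(dni_clean) >= 7:
--         formatted = ""
--         for i, char in enumerate(dni_clean[:-1]):
--             if i > 0 and (len(dni_clean) - i - 1) % 3 == 0:
--                 formatted += "."
--             formatted += char
--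
--         formatted += "-" + dni_clean[-1]
--         return formatted
--
--     return dni_clean
-- ===== SOURCE B (Python) =====
-- def format_dni(dni: str) -> str:
--     if not dni:
--         return dni
--
--     dni_clean = dni.replace(".", "").replace("-", "").strip()
--
--     if len(dni_clean) < 7:
--         return dni_clean
--
--     body = dni_clean[:-1]
--     res = body[-3:]
--     body = body[:-3]
--     while body:
--         res = body[-3:] + "." + res
--         body = body[:-3]
--     return res + "-" + dni_clean[-1:]
-- ===== Notes on version B (the rewrite author's own statement) =====
-- stated objective: alternative
-- what changed: A inserts dots during a left-to-right char-by-char pass using a modular index test; B splits off the check digit and chunks the body into groups of three from the right with slicing, joining the chunks with dots.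
import Mathlib
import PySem

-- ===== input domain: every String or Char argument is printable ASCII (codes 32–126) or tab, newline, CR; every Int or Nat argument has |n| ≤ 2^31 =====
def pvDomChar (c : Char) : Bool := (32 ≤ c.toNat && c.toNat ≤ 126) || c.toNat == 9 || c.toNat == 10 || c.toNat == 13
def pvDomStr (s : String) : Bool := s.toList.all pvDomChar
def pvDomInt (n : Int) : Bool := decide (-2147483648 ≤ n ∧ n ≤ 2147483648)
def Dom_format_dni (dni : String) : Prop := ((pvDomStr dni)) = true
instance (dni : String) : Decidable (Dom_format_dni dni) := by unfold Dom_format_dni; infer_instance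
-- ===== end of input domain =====

-- B replaces A's char-by-char modular-index dot insertion with right-to-left slice chunking (objective: alternative).

-- ===== PORT A =====
def format_dni (dni : String) : String :=
  if dni.toList = [] then dni
  else
    let clean := PySem.Chars.strip (PySem.Chars.replace (PySem.Chars.replace dni.toList ['.'] []) ['-'] [])
    if 7 ≤ clean.length then
      let formatted := (PySem.List.enumerate (PySem.List.slice clean none (some (-1)))).foldl
        (fun acc p =>
          (if 0 < p.1 ∧ PySem.Int.mod ((clean.length : Int) - p.1 - 1) 3 = 0 then acc ++ ['.'] else acc) ++ [p.2])
        []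
      -- dni_clean[-1]: in range because the guard gives clean.length ≥ 7, so pyGet? is some; getD never takes its default
      String.ofList (formatted ++ ['-', (PySem.List.pyGet? clean (-1)).getD ' '])
    else
      String.ofList clean

-- ===== PORT B =====
-- while body: res = body[-3:] + "." + res; body = body[:-3]
def pvGroupLoop (body res : List Char) : List Char :=
  if _h : body = [] then res
  else pvGroupLoop (PySem.List.slice body none (some (-3)))
                   (PySem.List.slice body (some (-3)) none ++ '.' :: res)
termination_by body.length
decreasing_by
  rw [PySem.List.slice_to_neg_ofNat body 3 (by omega)]
  have hl : body.length ≠ 0 := by simpa [List.length_eq_zero_iff] using _h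
  simp only [List.length_take]
  omega

def format_dni_alt (dni : String) : String :=
  if dni.toList = [] then dni
  else
    let clean := PySem.Chars.strip (PySem.Chars.replace (PySem.Chars.replace dni.toList ['.'] []) ['-'] [])
    if clean.length < 7 then String.ofList clean
    else
      let body := PySem.List.slice clean none (some (-1))
      let res := pvGroupLoop (PySem.List.slice body none (some (-3)))
                             (PySem.List.slice body (some (-3)) none)
      String.ofList (res ++ '-' :: PySem.List.slice clean (some (-1)) none)

-- ===== PRECONDITION & SPEC =====
def Spec_format_dni (dni : String) (out : String) : Prop := out = format_dni_alt dni
instance (dni : String) (out : String) : Decidable (Spec_format_dni dni out) := by unfold Spec_format_dni; infer_instance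

-- ===== CLAIM (what is proved, stated in full; the proofs are below) =====
def Claim_equal_format_dni : Prop := ∀ (dni : String), Dom_format_dni dni → Spec_format_dni dni (format_dni dni)

-- ===== LEMMAS AND PROOFS =====

-- what each element of A's loop contributes, with m = length of the body being enumerated
def pvG (m : Int) (p : Int × Char) : List Char :=
  (if 0 < p.1 ∧ PySem.Int.mod (m - p.1) 3 = 0 then ['.'] else []) ++ [p.2]

lemma pv_mem_enumerate {α : Type} {b : List α} {s : Int} {p : Int × α}
    (h : p ∈ PySem.List.enumerate b s) : s ≤ p.1 ∧ p.1 < s + b.length := by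
  induction b generalizing s with
  | nil => simp [PySem.List.enumerate_nil] at h
  | cons x t ih =>
    rw [PySem.List.enumerate_cons] at h
    rcases List.mem_cons.mp h with h | h
    · subst h; simp
    · have := ih h; simp only [List.length_cons]; push_cast; omega

lemma pv_fold_eq_flatMap (b : List Char) (C : Int × Char → Prop) [DecidablePred C]
    (acc : List Char) :
    (PySem.List.enumerate b).foldl
      (fun acc p => (if C p then acc ++ ['.'] else acc) ++ [p.2]) acc
    = acc ++ (PySem.List.enumerate b).flatMap
        (fun p => (if C p then ['.'] else []) ++ [p.2]) := by
  rw [PySem.List.foldl_congr_mem (g := fun acc p => acc ++ ((if C p then ['.'] else []) ++ [p.2]))]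
  · exact PySem.List.foldl_append_eq_flatMap _ _ _
  · intro acc p _; split_ifs <;> simp

lemma pv_flatMap_small (b : List Char) (hb : b.length ≤ 3) :
    (PySem.List.enumerate b).flatMap (pvG b.length) = b := by
  have : ∀ p ∈ PySem.List.enumerate b (0 : Int), pvG b.length p = [p.2] := by
    intro p hp
    have hr := pv_mem_enumerate hp
    have hm : ¬ (0 < p.1 ∧ PySem.Int.mod ((b.length : Int) - p.1) 3 = 0) := by
      rintro ⟨h1, h2⟩
      rw [PySem.Int.mod_eq_zero_iff_dvd] at h2
      omega
    simp only [pvG]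
    rw [if_neg hm]
    rfl
  rw [List.flatMap_congr this]
  have h2 := PySem.List.map_snd_enumerate b 0
  rw [← List.map_eq_flatMap]
  exact h2

lemma pv_loop_eq : ∀ (n : Nat) (b : List Char), b.length = n → b ≠ [] → ∀ res : List Char,
    pvGroupLoop (b.take (b.length - 3)) (b.drop (b.length - 3) ++ res)
    = (PySem.List.enumerate b).flatMap (pvG b.length) ++ res := by
  intro n
  induction n using Nat.strong_induction_on with
  | _ n ih =>
    intro b hn hb res
    by_cases hsmall : b.length ≤ 3
    · have h0 : b.length - 3 = 0 := by omega
      rw [h0, List.take_zero, List.drop_zero, pvGroupLoop, pv_flatMap_small b hsmall]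
      simp
    · -- b = c ++ s with s the last three characters
      set c := b.take (b.length - 3) with hc
      set s := b.drop (b.length - 3) with hs
      have hcs : c ++ s = b := List.take_append_drop _ b
      have hclen : c.length = b.length - 3 := by
        rw [hc, List.length_take]; omega
      have hslen : s.length = 3 := by
        rw [hs, List.length_drop]; omega
      have hcpos : 0 < c.length := by omega
      have hcne : c ≠ [] := by
        intro h; rw [h] at hclen; simp at hclen; omega
      obtain ⟨x, y, z, hxyz⟩ := List.length_eq_three.mp hslen
      -- left side: one unfolding of the loop, then the induction hypothesis on c
      rw [pvGroupLoop]
      simp only [hcne, dite_false]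
      rw [PySem.List.slice_to_neg_ofNat c 3 (by omega),
          PySem.List.slice_from_neg_ofNat c 3 (by omega)]
      have hlt : c.length < n := by omega
      have := ih c.length hlt c rfl hcne ('.' :: (s ++ res))
      rw [this]
      -- right side: split the enumeration of b = c ++ s
      have henum : PySem.List.enumerate b (0:Int)
          = PySem.List.enumerate c 0 ++ PySem.List.enumerate s ((0:Int) + c.length) := by
        rw [← hcs, PySem.List.enumerate_append]
      have hfirst : (PySem.List.enumerate c).flatMap (pvG b.length)
          = (PySem.List.enumerate c).flatMap (pvG c.length) := by
        apply List.flatMap_congr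
        intro p hp
        have hr := pv_mem_enumerate hp
        simp only [pvG, PySem.Int.mod_eq_zero_iff_dvd]
        have hiff : (0 < p.1 ∧ (3:Int) ∣ ((b.length : Int) - p.1))
            ↔ (0 < p.1 ∧ (3:Int) ∣ ((c.length : Int) - p.1)) := by
          constructor <;> rintro ⟨h1, h2⟩ <;> exact ⟨h1, by omega⟩
        rw [if_congr hiff rfl rfl]
      have hlast : (PySem.List.enumerate s ((0:Int) + c.length)).flatMap (pvG b.length)
          = '.' :: s := by
        have hb3 : (b.length : Int) = (c.length : Int) + 3 := by omega
        rw [hxyz]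
        simp only [PySem.List.enumerate_cons, PySem.List.enumerate_nil, List.flatMap_cons,
          List.flatMap_nil, pvG, PySem.Int.mod_eq_zero_iff_dvd]
        rw [if_pos ⟨by omega, by rw [hb3]; omega⟩,
            if_neg (by rintro ⟨h1, h2⟩; rw [hb3] at h2; omega),
            if_neg (by rintro ⟨h1, h2⟩; rw [hb3] at h2; omega)]
        simp
      rw [henum, List.flatMap_append, hfirst, hlast]
      simp [List.append_assoc]

lemma pv_last_split (clean : List Char) (h : clean ≠ []) :
    ∃ ys z, clean = ys ++ [z] := by
  rcases List.eq_nil_or_concat clean with h' | h'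
  · exact absurd h' h
  · obtain ⟨l', z, h⟩ := h'
    exact ⟨l', z, by simpa [List.concat_eq_append] using h⟩

-- ===== VERDICT (by name: the statement is the Claim_ definition above) =====
theorem format_dni_spec : Claim_equal_format_dni := by
  intro dni _
  unfold Spec_format_dni
  simp only [format_dni, format_dni_alt]
  by_cases h0 : dni.toList = []
  · simp [h0]
  · simp only [h0, if_false]
    set clean := PySem.Chars.strip (PySem.Chars.replace (PySem.Chars.replace dni.toList ['.'] []) ['-'] []) with hclean
    by_cases h7 : 7 ≤ clean.length
    · have h7' : ¬ clean.length < 7 := by omega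
      rw [if_pos h7, if_neg h7']
      refine congrArg String.ofList ?_
      have hcne : clean ≠ [] := by
        intro h; rw [h] at h7; simp at h7
      obtain ⟨ys, z, hyz⟩ := pv_last_split clean hcne
      -- the body is clean without its last character
      have hbody : PySem.List.slice clean none (some (-1)) = ys := by
        rw [PySem.List.slice_to_neg_one, hyz]; simp
      have hyslen : ys.length = clean.length - 1 := by
        rw [hyz]; simp
      have hysne : ys ≠ [] := by
        intro h; rw [h] at hyslen; simp at hyslen; omega
      -- A's fold is the flatMap with condition pvG ys.length
      rw [hbody]
      rw [pv_fold_eq_flatMap ys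
        (C := fun p => 0 < p.1 ∧ PySem.Int.mod ((clean.length : Int) - p.1 - 1) 3 = 0)]
      have hcond : (PySem.List.enumerate ys).flatMap
            (fun p => (if 0 < p.1 ∧ PySem.Int.mod ((clean.length : Int) - p.1 - 1) 3 = 0
                       then ['.'] else []) ++ [p.2])
          = (PySem.List.enumerate ys).flatMap (pvG ys.length) := by
        apply List.flatMap_congr
        intro p _
        simp only [pvG]
        have : (clean.length : Int) - p.1 - 1 = (ys.length : Int) - p.1 := by
          omega
        rw [this]
      rw [hcond]
      -- B's loop via the main lemma (with res = [])
      have hloop := pv_loop_eq ys.length ys rfl hysne []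
      rw [List.append_nil] at hloop
      rw [PySem.List.slice_to_neg_ofNat ys 3 (by omega),
          PySem.List.slice_from_neg_ofNat ys 3 (by omega), hloop]
      -- the final character
      rw [PySem.List.pyGet?_neg_one, PySem.List.slice_from_neg_one, hyz]
      simp
    · have h7' : clean.length < 7 := by omega
      rw [if_neg h7, if_pos h7']
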